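-- pv_equiv track=rewrite | github.com/sanidhya12345/pythoncode | mintype.py | solve
-- ===== SOURCE A (Python) =====
-- def solve(n,x,a,b):
--     coins=sorted(zip(a,b),reverse=True,key=lambda x: x[0])
--     total_value = sum(a * b for a, b in coins)
--     if total_value<x:
--         return -1
--     remaining=x
--     distinct_types=0
--     for value, count in coins:
--         max_contribution = value * count
--         if remaining > 0:
--             distinct_types += 1
--             if max_contribution >= remaining:
--                 remaining = 0
--                 break
--             else:
--                 remaining -= max_contribution
--     if remaining>0:
--         return -1
--     return distinct_types
-- ===== SOURCE B (Python) =====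
-- def solve(n, x, a, b):
--     coins = sorted(zip(a, b), reverse=True, key=lambda c: c[0])
--     total = 0
--     prefix = [0]
--     for v, c in coins:
--         total += v * c
--         prefix.append(total)
--     if total < x:
--         return -1
--     if x <= 0:
--         return 0
--     return next(i for i, s in enumerate(prefix) if s >= x)
-- ===== Notes on version B (the rewrite author's own statement) =====
-- stated objective: alternative
-- what changed: B replaces A's mutable greedy state (remaining/distinct_types with an early break) by building a prefix-sum table of value*count over the same sorted coins and returning the index of the first prefix sum >= x (0 if x <= 0, -1 if the total is short).
import Mathlib
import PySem

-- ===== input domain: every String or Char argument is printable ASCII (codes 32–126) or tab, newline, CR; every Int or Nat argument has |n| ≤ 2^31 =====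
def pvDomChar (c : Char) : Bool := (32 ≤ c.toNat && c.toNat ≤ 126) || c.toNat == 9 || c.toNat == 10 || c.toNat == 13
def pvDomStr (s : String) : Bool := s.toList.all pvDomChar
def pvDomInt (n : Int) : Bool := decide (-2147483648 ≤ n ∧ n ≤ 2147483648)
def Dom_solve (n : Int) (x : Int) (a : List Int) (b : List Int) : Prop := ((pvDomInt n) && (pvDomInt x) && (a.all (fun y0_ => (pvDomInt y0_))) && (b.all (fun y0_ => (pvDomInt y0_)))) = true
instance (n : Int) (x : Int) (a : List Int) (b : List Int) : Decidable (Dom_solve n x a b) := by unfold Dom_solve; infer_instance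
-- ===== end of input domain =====

-- B builds a pre-sum table over the same sorted coins and searches it for the first
-- pre ≥ x instead of A's mutable greedy loop; same cost, different structure.

-- ===== PORT A =====
-- the for-loop of A: state (remaining, distinct_types); break models the early return of the pair
def solveLoop : List (Int × Int) → Int → Int → Int × Int
  | [], remaining, distinct => (remaining, distinct)
  | (value, count) :: rest, remaining, distinct =>
    let mc := value * count
    if remaining > 0 then
      if mc ≥ remaining then (0, distinct + 1)
      else solveLoop rest (remaining - mc) (distinct + 1)
    else solveLoop rest remaining distinct

def solve (n : Int) (x : Int) (a : List Int) (b : List Int) : Int :=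
  let coins := PySem.List.sorted (a.zip b) (fun p => p.1) true
  let total_value := (coins.map (fun p => p.1 * p.2)).sum
  if total_value < x then -1
  else
    let rd := solveLoop coins x 0
    if rd.1 > 0 then -1 else rd.2

-- ===== PORT B =====
-- the for-loop of Source B: threads (total, pre list), appending each new running total
def buildPrefix : List (Int × Int) → Int → List Int → Int × List Int
  | [], total, pre => (total, pre)
  | (v, c) :: rest, total, pre =>
    buildPrefix rest (total + v * c) (pre ++ [total + v * c])

-- next(i for i, s in enumerate(pre) if s >= x); the [] case is unreachable in solve_alt
-- (it is only called when total ≥ x, so a hit exists)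
def findGe : List Int → Int → Int → Int
  | [], _, _ => -1
  | s :: rest, x, i => if s ≥ x then i else findGe rest x (i + 1)

def solve_alt (n : Int) (x : Int) (a : List Int) (b : List Int) : Int :=
  let coins := PySem.List.sorted (a.zip b) (fun p => p.1) true
  let tp := buildPrefix coins 0 [0]
  if tp.1 < x then -1
  else if x ≤ 0 then 0
  else findGe tp.2 x 0

-- ===== PRECONDITION & SPEC =====
def Spec_solve (n : Int) (x : Int) (a : List Int) (b : List Int) (out : Int) : Prop := out = solve_alt n x a b
instance (n : Int) (x : Int) (a : List Int) (b : List Int) (out : Int) : Decidable (Spec_solve n x a b out) := by unfold Spec_solve; infer_instance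

-- ===== CLAIM (what is proved, stated in full; the proofs are below) =====
def Claim_equal_solve : Prop := ∀ (n : Int) (x : Int) (a : List Int) (b : List Int), Dom_solve n x a b → Spec_solve n x a b (solve n x a b)

-- ===== LEMMAS AND PROOFS =====

def sumProd (coins : List (Int × Int)) : Int := (coins.map (fun p => p.1 * p.2)).sum

-- the running totals that Source B appends, as a plain recursion
def cums : List (Int × Int) → Int → List Int
  | [], _ => []
  | (v, c) :: rest, t => (t + v * c) :: cums rest (t + v * c)

lemma buildPrefix_eq : ∀ (coins : List (Int × Int)) (t : Int) (acc : List Int),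
    buildPrefix coins t acc = (t + sumProd coins, acc ++ cums coins t) := by
  intro coins
  induction coins with
  | nil => intro t acc; simp [buildPrefix, sumProd, cums]
  | cons hd tl ih =>
    obtain ⟨v, c⟩ := hd
    intro t acc
    rw [buildPrefix, ih]
    simp [sumProd, cums, List.append_assoc]
    ring

lemma solveLoop_nonpos : ∀ (coins : List (Int × Int)) (x d : Int), x ≤ 0 →
    solveLoop coins x d = (x, d) := by
  intro coins
  induction coins with
  | nil => intro x d h; simp [solveLoop]
  | cons hd tl ih =>
    intro x d h
    obtain ⟨v, c⟩ := hd
    rw [solveLoop]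
    simp only [if_neg (by omega : ¬ x > 0)]
    exact ih x d h

lemma solveLoop_eq_findGe : ∀ (coins : List (Int × Int)) (x c t i : Int),
    0 < x → x ≤ sumProd coins →
    solveLoop coins x c = (0, c + (findGe (cums coins t) (x + t) i - i) + 1) := by
  intro coins
  induction coins with
  | nil =>
    intro x c t i hx hs
    simp [sumProd] at hs
    omega
  | cons hd tl ih =>
    intro x c t i hx hs
    obtain ⟨v, cnt⟩ := hd
    have hs' : x ≤ v * cnt + sumProd tl := by
      simpa [sumProd] using hs
    rw [solveLoop, cums, findGe]
    simp only [if_pos (by omega : x > 0)]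
    by_cases hb : v * cnt ≥ x
    · rw [if_pos hb, if_pos (by linarith : t + v * cnt ≥ x + t)]
      simp
    · rw [if_neg hb, if_neg (by have := lt_of_not_ge hb; linarith : ¬ t + v * cnt ≥ x + t)]
      have harg : x + t = (x - v * cnt) + (t + v * cnt) := by ring
      rw [harg, ih (x - v * cnt) (c + 1) (t + v * cnt) (i + 1) (by omega) (by linarith)]
      generalize findGe (cums tl (t + v * cnt)) (x - v * cnt + (t + v * cnt)) (i + 1) = F
      simp only [Prod.mk.injEq, true_and]
      ring

-- ===== VERDICT (by name: the statement is the Claim_ definition above) =====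
theorem solve_spec : Claim_equal_solve := by
  intro n x a b _
  unfold Spec_solve solve solve_alt
  simp only [buildPrefix_eq, zero_add]
  set coins := PySem.List.sorted (a.zip b) (fun p => p.1) true with hc
  have htot : (List.map (fun p => p.1 * p.2) coins).sum = sumProd coins := rfl
  rw [htot]
  by_cases ht : sumProd coins < x
  · rw [if_pos ht, if_pos ht]
  · rw [if_neg ht, if_neg ht]
    by_cases hx : x ≤ 0
    · rw [solveLoop_nonpos coins x 0 hx, if_pos hx]
      simp only [if_neg (by omega : ¬ x > 0)]
    · rw [if_neg hx, solveLoop_eq_findGe coins x 0 0 1 (by omega) (by omega)]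
      simp only [List.cons_append, List.nil_append]
      rw [findGe]
      simp only [if_neg (by omega : ¬ (0 : Int) ≥ x), add_zero,
        if_neg (by omega : ¬ (0 : Int) > 0), zero_add]
      omega
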